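-- pv_equiv track=rewrite | github.com/FIWARE/tools.Fabre | fiware_api_blueprint_renderer/src/drafter_postprocessing/order_uri.py | order_uri_parameters
-- ===== SOURCE A (Python) =====
-- def order_uri_block(block):
--     """Take a variable block of a URI Template and return it ordered.
--
--     Arguments:
--     block -- String that specifies the block to be ordered
--     """
--
--     if '#' == block[0]: #fragment identifier operator
--         return block
--     if '+' == block[0]:
--         return block #reserved value operator
--
--     if not ('?' == block[0] or '&' == block[0]): #start with name
--         return block
--
--     parameters = (',').join(sorted((block[1:]).split(',')))
--
--     return ''+block[0]+ parameters
--
-- def order_uri_parameters(URI):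
--     """Take an URI and order it parameters.
--
--     Arguments:
--     URI -- URI to be ordered
--     """
--
--     _last_slash_position = URI.rfind('/')
--
--
--     if 0 > _last_slash_position:
--         return URI #parameters not found
--
--     parameters_string = URI[_last_slash_position:]
--     if 1 > len(parameters_string):
--         return URI #URI ends with /
--
--     parameter_blocks = parameters_string.split('{')
--
--     orderer_blocks = ""
--     for parameter_block in parameter_blocks[1:]:
--
--         if 0 > parameter_block.find('}'):#close block not found
--             return URI
--
--         _close_group_position = parameter_block.find('}')
--
--         ordered_parameters = order_uri_block(parameter_block[0:\
--             _close_group_position])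
--         orderer_blocks += '{'+ordered_parameters+parameter_block[\
--         _close_group_position:]
--
--     ordered_URI = URI[0:_last_slash_position]+parameter_blocks[0]+\
--                 orderer_blocks
--
--     return ordered_URI
-- ===== SOURCE B (Python) =====
-- def _sort_block(block):
--     """Sort the comma-separated names of a '?'/'&' block; other blocks pass through."""
--     if block[:1] in ('?', '&'):
--         return block[0] + ','.join(sorted(block[1:].split(',')))
--     return block
--
--
-- def order_uri_parameters(URI):
--     """Single left-to-right scan of the tail after the last slash: copy characters
--     verbatim, and on each '{' scan ahead character by character to the matching '}'
--     (aborting to the original URI if another '{' or the end of the string comes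
--     first), sorting the enclosed block in place."""
--     slash = URI.rfind('/')
--     if slash < 0:
--         return URI
--     tail = URI[slash:]
--     n = len(tail)
--     out = []
--     i = 0
--     while i < n:
--         c = tail[i]
--         if c != '{':
--             out.append(c)
--             i += 1
--             continue
--         j = i + 1
--         while j < n and tail[j] != '{' and tail[j] != '}':
--             j += 1
--         if j == n or tail[j] == '{':
--             return URI
--         out.append('{' + _sort_block(tail[i + 1:j]) + '}')
--         i = j + 1
--     return URI[:slash] + ''.join(out)
-- ===== Notes on version B (the rewrite author's own statement) =====
-- stated objective: alternative
-- what changed: B replaces A's staged pipeline (split the tail on '{', then per segment find('}') and re-glue with += concatenation) by a single left-to-right character scan of the tail that copies characters and, at each '{', scans ahead to the matching '}' (aborting if another '{' or the end comes first) and sorts the block in place.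
-- outside the precondition, e.g. on order_uri_parameters('/{}'): A raises IndexError, B returns '/{}'
import Mathlib
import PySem

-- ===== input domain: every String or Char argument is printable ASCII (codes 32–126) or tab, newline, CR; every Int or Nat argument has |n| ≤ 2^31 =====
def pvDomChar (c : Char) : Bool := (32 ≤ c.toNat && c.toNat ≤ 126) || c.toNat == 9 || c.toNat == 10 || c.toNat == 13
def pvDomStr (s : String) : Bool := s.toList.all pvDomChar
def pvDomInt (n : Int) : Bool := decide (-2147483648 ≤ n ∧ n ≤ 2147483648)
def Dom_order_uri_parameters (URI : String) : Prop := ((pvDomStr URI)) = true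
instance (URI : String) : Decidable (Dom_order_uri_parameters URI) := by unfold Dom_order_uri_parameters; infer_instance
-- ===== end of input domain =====

-- B replaces A's split-on-'{' staging with a single left-to-right character scan of the tail
-- that copies characters and sorts each brace block as it is met (objective: alternative).

-- ===== PORT A =====
-- order_uri_block; Python raises IndexError on an empty block (block[0]) — those inputs are outside Pre_,
-- the `none` branch is unreachable there and returns [] arbitrarily.
def orderUriBlock (block : List Char) : List Char :=
  match PySem.List.pyGet? block 0 with
  | none => []
  | some c =>
    if c = '#' then block
    else if c = '+' then block
    else if ¬ (c = '?' ∨ c = '&') then block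
    else
      let parameters := PySem.Chars.join [','] (PySem.List.sorted (PySem.Chars.splitOn (PySem.List.slice block (some 1)) [',']) (fun x => x) false)
      c :: parameters

-- the for-loop over parameter_blocks[1:]; `none` = the early `return URI`
def aLoop : List (List Char) → List Char → Option (List Char)
  | [], acc => some acc
  | pb :: rest, acc =>
    if PySem.Chars.find pb ['}'] < 0 then none
    else
      let p := PySem.Chars.find pb ['}']
      let ordered := orderUriBlock (PySem.List.slice pb (some 0) (some p))
      aLoop rest (acc ++ ('{' :: (ordered ++ PySem.List.slice pb (some p))))

def order_uri_parameters (URI : String) : String :=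
  let s := URI.toList
  let lastSlash := PySem.Chars.rfind s ['/']
  if 0 > lastSlash then URI
  else
    let ps := PySem.List.slice s (some lastSlash)
    if 1 > ps.length then URI
    else
      let blocks := PySem.Chars.splitOn ps ['{']
      match aLoop (blocks.drop 1) [] with
      | none => URI
      | some ob => String.ofList (PySem.List.slice s (some 0) (some lastSlash) ++ blocks.headI ++ ob)
      -- blocks[0]: str.split always returns a non-empty list, headI is exact here

-- ===== PORT B =====
-- port of _sort_block; block[:1] in ('?','&') is the take-1 test, block[0] the headI (non-empty under the guard)
def sortBlock (block : List Char) : List Char :=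
  if block.take 1 = ['?'] ∨ block.take 1 = ['&'] then
    block.headI :: PySem.Chars.join [','] (PySem.List.sorted (PySem.Chars.splitOn (block.drop 1) [',']) (fun x => x) false)
  else block

-- the scanner: Source B's outer while-loop is this recursion over the remaining tail characters;
-- the inner `while j ...` advancing past non-'{'/'}' characters is the takeWhile/dropWhile pair;
-- `none` = Source B's mid-loop `return URI`
def bScan : List Char → Option (List Char)
  | [] => some []
  | c :: rest =>
    if c ≠ '{' then
      match bScan rest with
      | none => none
      | some out => some (c :: out)
    else
      match hdp : rest.dropWhile (fun x => x != '{' && x != '}') with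
      | [] => none
      | d :: post =>
        if d = '{' then none
        else
          match bScan post with
          | none => none
          | some out =>
            some (('{' :: sortBlock (rest.takeWhile (fun x => x != '{' && x != '}')) ++ ['}']) ++ out)
termination_by l => l.length
decreasing_by
  · simp
  · have h := List.length_dropWhile_le (p := fun x => x != '{' && x != '}') (l := rest)
    rw [hdp] at h
    simp at h ⊢
    omega

def order_uri_parameters_alt (URI : String) : String :=
  let s := URI.toList
  let slash := PySem.Chars.rfind s ['/']
  if slash < 0 then URI
  else
    match bScan (PySem.List.slice s (some slash)) with
    | none => URI
    | some out => String.ofList (s.take slash.toNat ++ out)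

-- ===== PRECONDITION & SPEC =====
-- a segment (piece after a '{' in the tail) on which A's loop stops: it starts with '}' (A raises) or lacks '}' (A returns URI)
def pvBadSeg (b : List Char) : Bool := b.head? == some '}' || !PySem.Chars.isIn ['}'] b

-- Pre_ excludes exactly the inputs where A raises IndexError: URIs that contain a slash and whose first
-- abnormal brace segment after the last slash is an empty block (its closing brace comes immediately).
def Pre_order_uri_parameters (URI : String) : Prop :=
  PySem.Chars.rfind URI.toList ['/'] < 0 ∨
  (((PySem.Chars.splitOn (PySem.List.slice URI.toList (some (PySem.Chars.rfind URI.toList ['/']))) ['{']).drop 1).find? pvBadSeg).all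
    (fun b => b.head? != some '}') = true
instance (URI : String) : Decidable (Pre_order_uri_parameters URI) := by unfold Pre_order_uri_parameters; infer_instance

def pvWitness_order_uri_parameters : String := "/{?b,a}"

def Spec_order_uri_parameters (URI : String) (out : String) : Prop := out = order_uri_parameters_alt URI
instance (URI : String) (out : String) : Decidable (Spec_order_uri_parameters URI out) := by unfold Spec_order_uri_parameters; infer_instance

-- ===== CLAIM (what is proved, stated in full; the proofs are below) =====
def Claim_equal_order_uri_parameters : Prop := ∀ (URI : String), Dom_order_uri_parameters URI → Pre_order_uri_parameters URI → Spec_order_uri_parameters URI (order_uri_parameters URI)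

-- ===== LEMMAS AND PROOFS =====

-- proof-side helpers: what A's loop makes of one good segment
def charsPartition (s sep : List Char) : List Char × List Char × List Char :=
  let f := PySem.Chars.find s sep
  if f < 0 then (s, [], [])
  else (s.take f.toNat, sep, s.drop (f.toNat + sep.length))

def fixSegment (seg : List Char) : List Char :=
  let (block, _, rest) := charsPartition seg ['}']
  '{' :: (sortBlock block ++ '}' :: rest)

-- a structural model of str.split('{')
def splitC : List Char → List (List Char)
  | [] => [[]]
  | c :: rest =>
    if c = '{' then [] :: splitC rest
    else
      match splitC rest with
      | [] => [[c]]
      | h :: t => (c :: h) :: t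

def mapHd (p : List Char) : List (List Char) → List (List Char)
  | [] => [p]
  | h :: t => (p ++ h) :: t

lemma splitC_ne_nil (s : List Char) : splitC s ≠ [] := by
  cases s with
  | nil => simp [splitC]
  | cons c rest =>
    simp only [splitC]
    split
    · simp
    · split <;> simp

lemma go_eq_splitC (fuel : Nat) (l cur : List Char) (acc : List (List Char))
    (h : l.length < fuel) :
    PySem.Chars.splitOn.go ['{'] fuel l cur acc = acc.reverse ++ mapHd cur.reverse (splitC l) := by
  induction fuel generalizing l cur acc with
  | zero => omega
  | succ n ih =>
    cases l with
    | nil => simp [PySem.Chars.splitOn.go, splitC, mapHd]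
    | cons c rest =>
      by_cases hc : c = '{'
      · subst hc
        rw [show PySem.Chars.splitOn.go ['{'] (n+1) ('{' :: rest) cur acc
              = PySem.Chars.splitOn.go ['{'] n (List.drop 1 ('{' :: rest)) [] (cur.reverse :: acc) from by
            simp [PySem.Chars.splitOn.go, List.isPrefixOf]]
        rw [List.drop_one, List.tail_cons, ih rest [] (cur.reverse :: acc) (by simp at h; omega)]
        cases hs : splitC rest with
        | nil => exact absurd hs (splitC_ne_nil rest)
        | cons a t => simp [splitC, hs, mapHd]
      · rw [show PySem.Chars.splitOn.go ['{'] (n+1) (c :: rest) cur acc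
              = PySem.Chars.splitOn.go ['{'] n rest (c :: cur) acc from by
            simp [PySem.Chars.splitOn.go, List.isPrefixOf, Ne.symm hc]]
        rw [ih rest (c :: cur) acc (by simp at h ⊢; omega)]
        cases hs : splitC rest with
        | nil => exact absurd hs (splitC_ne_nil rest)
        | cons a t => simp [splitC, hc, hs, mapHd]

lemma splitOn_eq_splitC (s : List Char) : PySem.Chars.splitOn s ['{'] = splitC s := by
  have := go_eq_splitC (s.length + 1) s [] [] (by omega)
  rw [PySem.Chars.splitOn] at *
  rw [this]
  cases hs : splitC s with
  | nil => exact absurd hs (splitC_ne_nil s)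
  | cons a t => simp [mapHd]

lemma splitC_struct (s : List Char) :
    splitC s = s.takeWhile (fun c => c != '{') ::
      (match s.dropWhile (fun c => c != '{') with
       | [] => []
       | _ :: r => splitC r) := by
  induction s with
  | nil => simp [splitC]
  | cons c rest ih =>
    by_cases hc : c = '{'
    · subst hc; simp [splitC]
    · cases hs : splitC rest with
      | nil => exact absurd hs (splitC_ne_nil rest)
      | cons h t =>
        rw [hs] at ih
        simp only [splitC, if_neg hc, hs, List.takeWhile_cons, List.dropWhile_cons]
        have hb : (c != '{') = true := by simp [hc]
        rw [hb]
        simp only [if_true]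
        rw [List.cons.injEq] at ih
        rw [ih.1, ih.2]

lemma orderUriBlock_eq_sortBlock (block : List Char) (h : block ≠ []) :
    orderUriBlock block = sortBlock block := by
  obtain ⟨c, t, rfl⟩ := List.exists_cons_of_ne_nil h
  have hs : PySem.List.slice (c :: t) (some 1) = t := by
    rw [PySem.List.slice_from _ (by norm_num : (0:Int) ≤ 1)]; rfl
  simp only [orderUriBlock, sortBlock, PySem.List.pyGet?, hs]
  by_cases h1 : c = '#' <;> by_cases h2 : c = '+' <;> by_cases h3 : c = '?' <;> by_cases h4 : c = '&' <;>
    simp_all [PySem.List.pyIdx?]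

-- A's loop body on a good segment produces exactly fixSegment
lemma piece_eq (b : List Char) (hin : PySem.Chars.isIn ['}'] b = true) (hhd : b.head? ≠ some '}') :
    '{' :: (orderUriBlock (PySem.List.slice b (some 0) (some (PySem.Chars.find b ['}']))) ++
      PySem.List.slice b (some (PySem.Chars.find b ['}']))) = fixSegment b := by
  set f := PySem.Chars.find b ['}'] with hfdef
  have hf : 0 ≤ f := (PySem.Chars.find_nonneg_iff b ['}']).2 ((PySem.Chars.isIn_iff_infix _ _).1 hin)
  obtain ⟨u, hu⟩ := (PySem.Chars.find_spec hf).1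
  rw [← hfdef] at hu
  have hne0 : f.toNat ≠ 0 := by
    intro h0
    apply hhd
    rw [h0, List.drop_zero] at hu
    rw [← hu]; rfl
  have hdrop : b.drop f.toNat = '}' :: b.drop (f.toNat + 1) := by
    have htail : u = b.drop (f.toNat + 1) := by
      have h1 : u = (b.drop f.toNat).tail := by rw [← hu]; rfl
      rw [h1, List.tail_drop]
    rw [← hu, htail]
    rfl
  have hslice0 : PySem.List.slice b (some 0) (some f) = b.take f.toNat := by
    rw [show (0:Int) = ((0:Nat):Int) from rfl, show f = ((f.toNat:Nat):Int) from (Int.toNat_of_nonneg hf).symm,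
      PySem.List.slice_natCast]
    simp
    omega
  have hslicef : PySem.List.slice b (some f) = b.drop f.toNat := PySem.List.slice_from b hf
  have htk : b.take f.toNat ≠ [] := by
    have hlt : f.toNat < b.length := by
      by_contra hge
      rw [List.drop_eq_nil_of_le (by omega)] at hdrop
      exact (List.cons_ne_nil _ _) hdrop.symm
    have : ¬ (f.toNat = 0 ∨ b = []) := by
      rintro (h | h)
      · exact hne0 h
      · rw [h] at hlt; simp at hlt
    simpa [List.take_eq_nil_iff] using this
  rw [hslice0, hslicef, hdrop, orderUriBlock_eq_sortBlock _ htk]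
  simp only [fixSegment, charsPartition, ← hfdef, if_neg (by omega : ¬ f < 0)]
  simp

lemma aLoop_char (bs : List (List Char)) (acc : List Char)
    (H : ((bs.find? pvBadSeg).all (fun b => b.head? != some '}')) = true) :
    aLoop bs acc =
      if bs.any (fun seg => !PySem.Chars.isIn ['}'] seg) then none
      else some (acc ++ (bs.map fixSegment).flatten) := by
  induction bs generalizing acc with
  | nil => simp [aLoop]
  | cons b rest ih =>
    by_cases hbad : pvBadSeg b = true
    · rw [List.find?_cons_of_pos hbad] at H
      have hhd : (b.head? == some '}') = false := by
        simp only [Option.all] at H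
        simpa using H
      have hnin : PySem.Chars.isIn ['}'] b = false := by
        simp only [pvBadSeg, hhd, Bool.false_or, Bool.not_eq_eq_eq_not, Bool.not_true] at hbad
        exact hbad
      have hfind : PySem.Chars.find b ['}'] = -1 :=
        (PySem.Chars.find_eq_neg_one_iff b ['}']).2 ((PySem.Chars.isIn_eq_false_iff _ _).1 hnin)
      simp [aLoop, hfind, hnin]
    · rw [List.find?_cons_of_neg hbad] at H
      have hhd' : (b.head? == some '}') = false := by
        cases h : (b.head? == some '}') <;> simp_all [pvBadSeg]
      have hin : PySem.Chars.isIn ['}'] b = true := by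
        cases h : PySem.Chars.isIn ['}'] b <;> simp_all [pvBadSeg]
      have hhd : b.head? ≠ some '}' := by simpa using hhd'
      have hge : ¬ PySem.Chars.find b ['}'] < 0 := by
        have := (PySem.Chars.find_nonneg_iff b ['}']).2 ((PySem.Chars.isIn_iff_infix _ _).1 hin)
        omega
      rw [show aLoop (b :: rest) acc = aLoop rest (acc ++ ('{' :: (orderUriBlock (PySem.List.slice b (some 0) (some (PySem.Chars.find b ['}']))) ++ PySem.List.slice b (some (PySem.Chars.find b ['}']))))) from by
        simp [aLoop, hge]]
      rw [piece_eq b hin hhd, ih _ H]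
      simp [hin]

-- equation lemmas for the well-founded bScan
lemma bScan_cons_ne (c : Char) (rest : List Char) (hc : c ≠ '{') :
    bScan (c :: rest) = match bScan rest with | none => none | some out => some (c :: out) := by
  rw [bScan]; simp [hc]

lemma bScan_brace_nil (rest : List Char) (h : List.dropWhile (fun x : Char => x != '{' && x != '}') rest = []) :
    bScan ('{' :: rest) = none := by
  rw [bScan]; simp only [ne_eq, not_true_eq_false, if_false]; split <;> simp_all

lemma bScan_brace_open (rest post : List Char) (h : List.dropWhile (fun x : Char => x != '{' && x != '}') rest = '{' :: post) :
    bScan ('{' :: rest) = none := by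
  rw [bScan]; simp only [ne_eq, not_true_eq_false, if_false]; split <;> simp_all

lemma bScan_brace_close (rest post : List Char) (d : Char)
    (h : List.dropWhile (fun x : Char => x != '{' && x != '}') rest = d :: post) (hd : d ≠ '{') :
    bScan ('{' :: rest) = match bScan post with
      | none => none
      | some out => some (('{' :: sortBlock (rest.takeWhile (fun x : Char => x != '{' && x != '}')) ++ ['}']) ++ out) := by
  rw [bScan]; simp only [ne_eq, not_true_eq_false, if_false]
  split
  · simp_all
  · rename_i d' post' heq
    rw [h] at heq
    cases heq
    simp [hd]

lemma takeWhile_append_all (p : Char → Bool) (l₁ l₂ : List Char) (h : ∀ x ∈ l₁, p x = true) :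
    (l₁ ++ l₂).takeWhile p = l₁ ++ l₂.takeWhile p := by
  induction l₁ with
  | nil => simp
  | cons a t ih => simp_all

lemma dropWhile_append_all (p : Char → Bool) (l₁ l₂ : List Char) (h : ∀ x ∈ l₁, p x = true) :
    (l₁ ++ l₂).dropWhile p = l₂.dropWhile p := by
  induction l₁ with
  | nil => simp
  | cons a t ih => simp_all

lemma dropWhile_head_false (p : Char → Bool) (l post : List Char) (d : Char)
    (h : l.dropWhile p = d :: post) : p d = false := by
  induction l with
  | nil => simp [List.dropWhile] at h
  | cons a t ih =>
    rw [List.dropWhile_cons] at h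
    by_cases hp : p a = true
    · rw [if_pos hp] at h; exact ih h
    · rw [if_neg hp] at h
      cases h
      simpa using hp

lemma isIn_singleton_mem (a : Char) (l : List Char) (h : a ∈ l) : PySem.Chars.isIn [a] l = true := by
  rw [PySem.Chars.isIn_iff_infix]
  obtain ⟨s, t, rfl⟩ := List.append_of_mem h
  exact ⟨s, t, by simp⟩

lemma isIn_singleton_not_mem (a : Char) (l : List Char) (h : a ∉ l) : PySem.Chars.isIn [a] l = false := by
  rw [PySem.Chars.isIn_eq_false_iff]
  rintro ⟨s, t, rfl⟩
  exact h (by simp)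

lemma prefix_singleton_head (a : Char) (l : List Char) (h : [a] <+: l) : l.head? = some a := by
  obtain ⟨t, rfl⟩ := h; rfl

lemma find_char_of_append (pre r : List Char) (hpre : '}' ∉ pre) :
    PySem.Chars.find (pre ++ '}' :: r) ['}'] = (pre.length : Int) := by
  have hmem : '}' ∈ pre ++ '}' :: r := by simp
  have hf : 0 ≤ PySem.Chars.find (pre ++ '}' :: r) ['}'] := by
    rw [PySem.Chars.find_nonneg_iff]
    exact (PySem.Chars.isIn_iff_infix _ _).1 (isIn_singleton_mem _ _ hmem)
  obtain ⟨hpref, hmin⟩ := PySem.Chars.find_spec hf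
  set f := PySem.Chars.find (pre ++ '}' :: r) ['}'] with hfd
  have hdropl : (pre ++ '}' :: r).drop pre.length = '}' :: r := by
    simp
  have hub : ¬ pre.length < f.toNat := by
    intro hlt
    exact hmin pre.length hlt ⟨r, by simp [hdropl]⟩
  have hlb : ¬ f.toNat < pre.length := by
    intro hlt
    have hh := prefix_singleton_head _ _ hpref
    rw [List.head?_drop, List.getElem?_append_left (by omega : f.toNat < pre.length)] at hh
    have : pre[f.toNat]'(by omega) = '}' := by
      have := List.getElem?_eq_getElem (l := pre) (i := f.toNat) (by omega)
      rw [this] at hh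
      exact Option.some.inj hh
    exact hpre (this ▸ List.getElem_mem _)
  omega

lemma fixSegment_append (pre r : List Char) (hpre : '}' ∉ pre) :
    fixSegment (pre ++ '}' :: r) = '{' :: (sortBlock pre ++ '}' :: r) := by
  have hfind := find_char_of_append pre r hpre
  have htake : (pre ++ '}' :: r).take pre.length = pre := by simp
  have hdrop : (pre ++ '}' :: r).drop (pre.length + 1) = r := by
    rw [show pre ++ '}' :: r = (pre ++ ['}']) ++ r by simp,
      show pre.length + 1 = (pre ++ ['}']).length by simp]
    simp
  simp only [fixSegment, charsPartition, hfind]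
  rw [if_neg (by omega)]
  simp only [Int.toNat_natCast, List.length_singleton, htake, hdrop]

-- the scanner computes exactly the split-based normal form
lemma bScan_eq_aux (n : Nat) : ∀ (s : List Char), s.length ≤ n →
    (((splitC s).drop 1).find? pvBadSeg).all (fun b => b.head? != some '}') = true →
    bScan s =
      (if ((splitC s).drop 1).any (fun seg => !PySem.Chars.isIn ['}'] seg) then none
       else some ((splitC s).headI ++ (((splitC s).drop 1).map fixSegment).flatten)) := by
  induction n with
  | zero =>
    intro s hs _
    have hnil : s = [] := List.eq_nil_of_length_eq_zero (Nat.le_zero.1 hs)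
    subst hnil
    simp [bScan, splitC]
  | succ n ih =>
    intro s hs H
    cases s with
    | nil => simp [bScan, splitC]
    | cons c rest =>
      by_cases hc : c = '{'
      · subst hc
        have hsplit : splitC ('{' :: rest) = [] :: splitC rest := by simp [splitC]
        cases hdp : List.dropWhile (fun x : Char => x != '{' && x != '}') rest with
        | nil =>
          have hall : ∀ x ∈ rest, ((x != '{' && x != '}') = true) := by
            simpa [List.dropWhile_eq_nil_iff] using hdp
          have hnmem : '}' ∉ rest := fun hm => by have := hall _ hm; simp at this
          have hseg : rest.takeWhile (fun c : Char => c != '{') = rest := by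
            rw [List.takeWhile_eq_self_iff]
            intro x hx
            have := hall x hx
            simp at this ⊢
            exact this.1
          have hin : PySem.Chars.isIn ['}'] (rest.takeWhile (fun c : Char => c != '{')) = false := by
            rw [hseg]; exact isIn_singleton_not_mem _ _ hnmem
          rw [bScan_brace_nil rest hdp, hsplit, splitC_struct rest]
          simp [hin]
        | cons d post =>
          have hdpb : ((d != '{' && d != '}') = false) := dropWhile_head_false _ _ _ _ hdp
          have hrest : List.takeWhile (fun x : Char => x != '{' && x != '}') rest ++ d :: post = rest := by
            rw [← hdp]; exact List.takeWhile_append_dropWhile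
          set pre := List.takeWhile (fun x : Char => x != '{' && x != '}') rest with hpredef
          have hpremem : ∀ x ∈ pre, x ≠ '{' ∧ x ≠ '}' := fun x hx => by
            have := List.mem_takeWhile_imp hx
            simpa using this
          by_cases hdbrace : d = '{'
          · subst hdbrace
            have hseg : rest.takeWhile (fun c : Char => c != '{') = pre := by
              rw [← hrest, takeWhile_append_all _ _ _ (fun x hx => by simp [(hpremem x hx).1])]
              simp
            have hnm : '}' ∉ pre := fun hm => (hpremem _ hm).2 rfl
            have hin : PySem.Chars.isIn ['}'] (rest.takeWhile (fun c : Char => c != '{')) = false := by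
              rw [hseg]; exact isIn_singleton_not_mem _ _ hnm
            rw [bScan_brace_open rest post hdp, hsplit, splitC_struct rest]
            simp [hin]
          · have hdc : d = '}' := by
              simp only [Bool.and_eq_false_iff, bne_eq_false_iff_eq] at hdpb
              rcases hdpb with h | h
              · exact absurd h hdbrace
              · exact h
            subst hdc
            have hnm : '}' ∉ pre := fun hm => (hpremem _ hm).2 rfl
            have hsegq : rest.takeWhile (fun c : Char => c != '{') =
                pre ++ '}' :: post.takeWhile (fun c : Char => c != '{') := by
              rw [← hrest, takeWhile_append_all _ _ _ (fun x hx => by simp [(hpremem x hx).1])]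
              simp
            have hdropq : rest.dropWhile (fun c : Char => c != '{') =
                post.dropWhile (fun c : Char => c != '{') := by
              rw [← hrest, dropWhile_append_all _ _ _ (fun x hx => by simp [(hpremem x hx).1])]
              simp
            have htl : (match post.dropWhile (fun c : Char => c != '{') with
                | [] => ([] : List (List Char)) | _ :: r => splitC r) = (splitC post).drop 1 := by
              conv_rhs => rw [splitC_struct post]
              simp
            have hstruct : splitC rest =
                (pre ++ '}' :: post.takeWhile (fun c : Char => c != '{')) :: (splitC post).drop 1 := by
              rw [splitC_struct rest, hsegq, hdropq, htl]
            have hsegin : PySem.Chars.isIn ['}'] (pre ++ '}' :: post.takeWhile (fun c : Char => c != '{')) = true :=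
              isIn_singleton_mem _ _ (by simp)
            have H1 : ((splitC rest).find? pvBadSeg).all (fun b => b.head? != some '}') = true := by
              rw [hsplit] at H
              simpa using H
            have hprenil : pre ≠ [] := by
              intro h0
              rw [hstruct, h0] at H1
              have hbadt : pvBadSeg ('}' :: post.takeWhile (fun c : Char => c != '{')) = true := by
                simp [pvBadSeg]
              rw [List.nil_append, List.find?_cons_of_pos hbadt] at H1
              simp at H1
            have hbadf : pvBadSeg (pre ++ '}' :: post.takeWhile (fun c : Char => c != '{')) = false := by
              cases hp : pre with
              | nil => exact absurd hp hprenil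
              | cons a t =>
                have ha : a ≠ '}' := (hpremem a (by rw [hp]; exact List.mem_cons_self)).2
                have hin2 := hsegin
                rw [hp] at hin2
                simp only [List.cons_append] at hin2
                simp [pvBadSeg, ha, hin2]
            have H' : (((splitC post).drop 1).find? pvBadSeg).all (fun b => b.head? != some '}') = true := by
              rw [hstruct, List.find?_cons_of_neg (by simp [hbadf])] at H1
              exact H1
            have hlenr : rest.length = pre.length + 1 + post.length := by
              rw [← hrest]; simp; omega
            have IH := ih post (by simp at hs; omega) H'
            have hfix := fixSegment_append pre (post.takeWhile (fun c : Char => c != '{')) hnm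
            have hheadpost : (splitC post).headI = post.takeWhile (fun c : Char => c != '{') := by
              rw [splitC_struct post]; rfl
            rw [bScan_brace_close rest post '}' hdp (by decide), IH, hsplit, hstruct]
            simp only [List.drop_succ_cons, List.drop_zero, List.headI_cons, List.map_cons,
              List.flatten_cons, List.nil_append, List.any_cons]
            have hnotseg : (!PySem.Chars.isIn ['}'] (pre ++ '}' :: List.takeWhile (fun c : Char => c != '{') post)) = false := by
              rw [hsegin]; rfl
            rw [hnotseg, Bool.false_or]
            by_cases hany : ((splitC post).drop 1).any (fun seg => !PySem.Chars.isIn ['}'] seg) = true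
            · rw [if_pos hany, if_pos hany]
            · rw [Bool.not_eq_true] at hany
              rw [hany]
              simp only [Bool.false_eq_true, if_false]
              rw [hfix, hheadpost]
              simp [List.append_assoc]
              rw [hpredef]
      · cases hsr : splitC rest with
        | nil => exact absurd hsr (splitC_ne_nil rest)
        | cons h t =>
          have hsplit : splitC (c :: rest) = (c :: h) :: t := by simp [splitC, hc, hsr]
          have H' : (((splitC rest).drop 1).find? pvBadSeg).all (fun b => b.head? != some '}') = true := by
            rw [hsplit] at H
            rw [hsr]
            simpa using H
          have IH := ih rest (by simp at hs; omega) H'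
          rw [bScan_cons_ne c rest hc, IH, hsplit, hsr]
          by_cases hany : t.any (fun seg => !PySem.Chars.isIn ['}'] seg) = true
          · simp [hany]
          · rw [Bool.not_eq_true] at hany
            simp [hany]

lemma bScan_eq (s : List Char)
    (H : (((splitC s).drop 1).find? pvBadSeg).all (fun b => b.head? != some '}') = true) :
    bScan s =
      if ((splitC s).drop 1).any (fun seg => !PySem.Chars.isIn ['}'] seg) then none
      else some ((splitC s).headI ++ (((splitC s).drop 1).map fixSegment).flatten) :=
  bScan_eq_aux s.length s le_rfl H

-- ===== VERDICT (by name: the statement is the Claim_ definition above) =====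
theorem order_uri_parameters_spec : Claim_equal_order_uri_parameters := by
  unfold Claim_equal_order_uri_parameters
  intro URI _ hpre
  unfold Spec_order_uri_parameters
  simp only [order_uri_parameters, order_uri_parameters_alt]
  by_cases hneg : PySem.Chars.rfind URI.toList ['/'] < 0
  · rw [if_pos hneg, if_pos hneg]
  · have h0 : (0:Int) ≤ PySem.Chars.rfind URI.toList ['/'] := by omega
    rw [if_neg hneg, if_neg hneg]
    set tail := PySem.List.slice URI.toList (some (PySem.Chars.rfind URI.toList ['/'])) with htail
    have hpre' : (((splitC tail).drop 1).find? pvBadSeg).all (fun b => b.head? != some '}') = true := by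
      rcases hpre with h | h
      · omega
      · rw [← splitOn_eq_splitC]; exact h
    rw [bScan_eq tail hpre']
    have hslice0 : PySem.List.slice URI.toList (some 0) (some (PySem.Chars.rfind URI.toList ['/'])) = URI.toList.take (PySem.Chars.rfind URI.toList ['/']).toNat := by
      rw [show (0:Int) = ((0:Nat):Int) from rfl,
        show PySem.Chars.rfind URI.toList ['/'] = (((PySem.Chars.rfind URI.toList ['/']).toNat:Nat):Int) from (Int.toNat_of_nonneg h0).symm,
        PySem.List.slice_natCast]
      simp
      omega
    by_cases hlen : 1 > tail.length
    · rw [if_pos hlen]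
      have hnil : tail = [] := by
        cases h : tail with
        | nil => rfl
        | cons a t => rw [h] at hlen; simp at hlen
      have hall : URI.toList.length ≤ (PySem.Chars.rfind URI.toList ['/']).toNat := by
        rw [htail, PySem.List.slice_from _ h0] at hnil
        have := List.drop_eq_nil_iff.1 hnil
        omega
      rw [hnil]
      simp [splitC, List.take_of_length_le hall]
    · rw [if_neg hlen, splitOn_eq_splitC, aLoop_char _ [] hpre']
      by_cases hany : ((splitC tail).drop 1).any (fun seg => !PySem.Chars.isIn ['}'] seg) = true
      · rw [if_pos hany, if_pos hany]
      · rw [Bool.not_eq_true] at hany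
        rw [if_neg (show ¬ _ = true by rw [hany]; simp), if_neg (show ¬ _ = true by rw [hany]; simp)]
        rw [hslice0]
        simp
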